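-- pv_equiv track=rewrite | github.com/cctbx/cctbx_project | libtbx/str_utils.py | split_keeping_spaces
-- ===== SOURCE A (Python) =====
-- def split_keeping_spaces(s):
--   result = []
--   field = []
--   prev = " "
--   for c in s:
--     if ((prev == " ") != (c == " ")):
--       if (len(field) != 0):
--         result.append("".join(field))
--         field = []
--     field.append(c)
--     prev = c
--   if (len(field) != 0):
--     result.append("".join(field))
--   return result
-- ===== SOURCE B (Python) =====
-- def split_keeping_spaces(s):
--   result = []
--   i = 0
--   n = len(s)
--   while i < n:
--     key = (s[i] == " ")
--     j = i + 1
--     while j < n and (s[j] == " ") == key: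
--       j += 1
--     result.append(s[i:j])
--     i = j
--   return result
-- ===== Notes on version B (the rewrite author's own statement) =====
-- stated objective: alternative
-- what changed: Replaces the prev-flag/field-buffer state machine over characters with a two-pointer run scanner: for each run start it scans to the run's end and emits the slice s[i:j] directly, keeping no buffer or previous-character state.
import Mathlib
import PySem

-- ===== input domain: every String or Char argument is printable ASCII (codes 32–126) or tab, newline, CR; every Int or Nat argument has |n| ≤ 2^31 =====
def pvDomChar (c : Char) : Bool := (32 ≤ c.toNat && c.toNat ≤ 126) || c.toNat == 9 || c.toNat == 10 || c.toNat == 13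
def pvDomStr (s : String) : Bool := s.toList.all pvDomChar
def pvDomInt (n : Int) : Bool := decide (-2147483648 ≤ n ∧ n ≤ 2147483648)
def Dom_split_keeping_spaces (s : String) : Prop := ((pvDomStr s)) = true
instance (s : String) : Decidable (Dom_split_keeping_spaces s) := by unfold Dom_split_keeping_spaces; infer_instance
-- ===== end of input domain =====

-- B replaces A's prev-flag/field-buffer state machine with a two-pointer run scanner (alternative decomposition, same cost).


-- ===== PORT A =====
-- state: (result, field, prev); flush field on a space/non-space boundary, and once at the end
def splitStepA (st : List String × List Char × Char) (c : Char) : List String × List Char × Char :=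
  let result := st.1
  let field := st.2.1
  let prev := st.2.2
  let rf :=
    if ((prev == ' ') != (c == ' ')) then
      if field.length ≠ 0 then (result ++ [String.ofList field], ([] : List Char))
      else (result, field)
    else (result, field)
  (rf.1, rf.2 ++ [c], c)

def split_keeping_spaces (s : String) : List String :=
  let st := s.toList.foldl splitStepA ([], [], ' ')
  if st.2.1.length ≠ 0 then st.1 ++ [String.ofList st.2.1] else st.1

-- ===== PORT B =====
-- two-pointer scan: from each run start, take the maximal run with the same is-space key, emit it, continue after it
def groupRuns : List Char → List (List Char)
  | [] => []
  | c :: cs =>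
    (c :: cs.takeWhile (fun d => (d == ' ') == (c == ' '))) ::
      groupRuns (cs.dropWhile (fun d => (d == ' ') == (c == ' ')))
termination_by l => l.length
decreasing_by
  simp only [List.length_cons]
  exact Nat.lt_succ_of_le (List.length_dropWhile_le _ _)

def split_keeping_spaces_alt (s : String) : List String :=
  (groupRuns s.toList).map String.ofList

-- ===== PRECONDITION & SPEC =====
def Spec_split_keeping_spaces (s : String) (out : List String) : Prop := out = split_keeping_spaces_alt s
instance (s : String) (out : List String) : Decidable (Spec_split_keeping_spaces s out) := by unfold Spec_split_keeping_spaces; infer_instance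

-- ===== CLAIM (what is proved, stated in full; the proofs are below) =====
def Claim_equal_split_keeping_spaces : Prop := ∀ (s : String), Dom_split_keeping_spaces s → Spec_split_keeping_spaces s (split_keeping_spaces s)

-- ===== LEMMAS AND PROOFS =====

def splitFinish (st : List String × List Char × Char) : List String :=
  if st.2.1.length ≠ 0 then st.1 ++ [String.ofList st.2.1] else st.1

theorem splitFoldl_inv (cs : List Char) : ∀ (r : List String) (f : List Char) (p : Char),
    f ≠ [] →
    splitFinish (cs.foldl splitStepA (r, f, p)) =
      r ++ ((f ++ cs.takeWhile (fun d => (d == ' ') == (p == ' '))) ::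
        groupRuns (cs.dropWhile (fun d => (d == ' ') == (p == ' ')))).map String.ofList := by
  induction cs with
  | nil =>
    intro r f p hf
    simp [splitFinish, List.length_eq_zero_iff, hf, groupRuns]
  | cons c cs ih =>
    intro r f p hf
    by_cases hk : (c == ' ') = (p == ' ')
    · -- same run: no flush, extend field
      have hstep : splitStepA (r, f, p) c = (r, f ++ [c], c) := by
        simp [splitStepA, hk]
      have hfun : (fun d => (d == ' ') == (c == ' ')) = (fun d => (d == ' ') == (p == ' ')) := by
        funext d; rw [hk]
      rw [List.foldl_cons, hstep, ih r (f ++ [c]) c (by simp)]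
      simp [hk]
    · -- boundary: flush field, start a new one with c
      have hk2 : ¬(p = ' ' ↔ c = ' ') := by
        intro h
        apply hk
        by_cases hp : p = ' '
        · simp [hp, h.mp hp]
        · have hc : ¬ c = ' ' := fun hc => hp (h.mpr hc)
          simp [hp, hc]
      have hstep : splitStepA (r, f, p) c = (r ++ [String.ofList f], [c], c) := by
        simp [splitStepA, List.length_eq_zero_iff, hf, hk2]
      rw [List.foldl_cons, hstep, ih (r ++ [String.ofList f]) [c] c (by simp)]
      have hk' : ((c == ' ') == (p == ' ')) = false := by
        simp [hk]
      simp [hk', groupRuns]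

-- ===== VERDICT (by name: the statement is the Claim_ definition above) =====
theorem split_keeping_spaces_spec : Claim_equal_split_keeping_spaces := by
  intro s _
  show split_keeping_spaces s = split_keeping_spaces_alt s
  unfold split_keeping_spaces split_keeping_spaces_alt
  cases h : s.toList with
  | nil => simp [groupRuns]
  | cons c cs =>
    have hstep : splitStepA ([], [], ' ') c = ([], [c], c) := by
      simp [splitStepA]
    have := splitFoldl_inv cs [] [c] c (by simp)
    simp only [List.foldl_cons, hstep]
    rw [show (if ((cs.foldl splitStepA ([], [c], c)).2.1.length ≠ 0) then
        (cs.foldl splitStepA ([], [c], c)).1 ++ [String.ofList (cs.foldl splitStepA ([], [c], c)).2.1]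
        else (cs.foldl splitStepA ([], [c], c)).1) = splitFinish (cs.foldl splitStepA ([], [c], c)) from rfl, this]
    simp [groupRuns]
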